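-- pv_equiv track=rewrite | github.com/dmitryv56/stgelpDL | stgelpDL/canbus/api.py | genTransition
-- ===== SOURCE A (Python) =====
-- SIG_  = 0
--
-- SIG_0 = 1
--
-- SIG_1 = 2
--
-- T__ = 0   # no signal to no signal SIG_ -> SIG_
--
-- T_0 = 1   # SIG_ -> SIG_0
--
-- T0_ = 2   # SIG_0 -> SIG_
--
-- T_1 = 3   # SIG_ -> SIG_1
--
-- T1_ = 4   # SIG_1 _> SIG_
--
-- T00 = 5   # SIG_0 -> SIG_0
--
-- T01 = 6   # SIG_0 -> SIG_1
--
-- T10 = 7   # SIG_1 -> SIG_0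
--
-- T11 = 8   # SIG_1 -> SIG_1
--
-- def transitionRules(prev_state:int, current_bit:str)->(int, int):
--     """
--
--     :param prev_state:
--     :param current_bit:
--     :return:
--     """
--     if prev_state==SIG_:
--         if current_bit=='0':
--             transition=T_0
--         elif current_bit=='1':
--             transition=T_1
--         elif current_bit=='*':
--             transition=T__
--         else:
--             transition=T__
--
--     elif prev_state==SIG_0:
--         if current_bit == '0':
--             transition = T00
--         elif current_bit == '1':
--             transition = T01
--         elif current_bit == '*':
--             transition = T0_
--         else:
--             transition = T0_
--     elif prev_state==SIG_1:
--         if current_bit == '0':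
--             transition = T10
--         elif current_bit == '1':
--             transition = T11
--         elif current_bit == '*':
--             transition = T1_
--         else:
--             transition = T1_
--     if current_bit=='0':
--         new_state=SIG_0
--     elif current_bit=='1':
--         new_state=SIG_1
--     elif current_bit == '*':
--         new_state=SIG_
--     else:
--         new_state=SIG_
--     return transition, new_state
--
-- def genTransition(prev_st:int=SIG_, bit_str:str=None, f:object=None)->(list,int):
--
--     """ transition array generation"""
--     transition=[]
--     st=prev_st
--     for i in range(len(bit_str)):
--         tr,st=transitionRules(st, bit_str[i])
--         transition.append(tr)
--     prev_st=SIG_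
--     return transition,prev_st
-- ===== SOURCE B (Python) =====
-- SIG_  = 0
-- SIG_0 = 1
-- SIG_1 = 2
--
-- # transition codes (t_on_'0', t_on_'1', t_otherwise) keyed by the "from" state
-- _RULES = {SIG_: (1, 3, 0), SIG_0: (5, 6, 2), SIG_1: (7, 8, 4)}
--
--
-- def _from_state(c):
--     # the state the machine is in AFTER reading character c
--     return SIG_0 if c == '0' else SIG_1 if c == '1' else SIG_
--
--
-- def _rule(st, c):
--     t0, t1, tother = _RULES[st]
--     return t0 if c == '0' else t1 if c == '1' else tother
--
--
-- def genTransition(prev_st=SIG_, bit_str=None, f=None):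
--     froms = [prev_st] + [_from_state(c) for c in bit_str[:-1]]
--     return [_rule(s, c) for s, c in zip(froms, bit_str)], SIG_
-- ===== Notes on version B (the rewrite author's own statement) =====
-- stated objective: alternative
-- what changed: B eliminates A's running-state accumulator: since the machine state after each character is a pure function of that character, B builds the list of 'from' states as [prev_st] + map(from_state, bit_str[:-1]) and zips it with the characters through a pure transition-code table, instead of threading state through a sequential loop.
import Mathlib
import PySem

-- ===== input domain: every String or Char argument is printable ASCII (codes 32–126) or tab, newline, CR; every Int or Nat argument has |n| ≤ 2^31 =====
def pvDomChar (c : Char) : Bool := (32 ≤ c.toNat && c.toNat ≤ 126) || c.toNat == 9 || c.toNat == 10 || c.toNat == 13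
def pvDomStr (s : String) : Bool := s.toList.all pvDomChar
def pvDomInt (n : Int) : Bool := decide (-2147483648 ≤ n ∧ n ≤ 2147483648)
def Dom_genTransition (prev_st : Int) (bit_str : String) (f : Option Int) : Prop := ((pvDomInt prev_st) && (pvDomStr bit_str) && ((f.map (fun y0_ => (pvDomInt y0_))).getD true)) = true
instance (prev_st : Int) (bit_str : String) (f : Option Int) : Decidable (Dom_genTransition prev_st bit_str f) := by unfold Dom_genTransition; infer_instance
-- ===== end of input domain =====

-- B replaces A's running-state accumulator by a stateless two-pass map: the "from" state of each
-- position is a pure function of the previous character, so B zips [prev_st] ++ map fromState with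
-- the characters (objective: alternative decomposition, same cost).

-- ===== PORT A =====
-- transitionRules: returns none exactly where Python's `transition` stays unbound
-- (prev_state outside {SIG_, SIG_0, SIG_1}) and raises UnboundLocalError.
def transitionRulesA (prev_state : Int) (current_bit : Char) : Option (Int × Int) :=
  let transition? : Option Int :=
    if prev_state = 0 then      -- SIG_
      some (if current_bit = '0' then 1 else if current_bit = '1' then 3
            else if current_bit = '*' then 0 else 0)
    else if prev_state = 1 then -- SIG_0
      some (if current_bit = '0' then 5 else if current_bit = '1' then 6
            else if current_bit = '*' then 2 else 2)
    else if prev_state = 2 then -- SIG_1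
      some (if current_bit = '0' then 7 else if current_bit = '1' then 8
            else if current_bit = '*' then 4 else 4)
    else none
  let new_state : Int :=
    if current_bit = '0' then 1 else if current_bit = '1' then 2
    else if current_bit = '*' then 0 else 0
  transition?.map (fun t => (t, new_state))

-- A's loop over the characters, threading the running state st
def genLoopA (st : Int) (cs : List Char) : Option (List Int) :=
  match cs with
  | [] => some []
  | c :: rest =>
    match transitionRulesA st c with
    | none => none
    | some (tr, st') => (genLoopA st' rest).map (fun l => tr :: l)

def genTransition (prev_st : Int) (bit_str : String) (f : Option Int) : List Int × Int :=
  ((genLoopA prev_st bit_str.toList).getD [], 0)   -- getD unreachable inside Pre_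

-- ===== PORT B =====
def fromState (c : Char) : Int :=
  if c = '0' then 1 else if c = '1' then 2 else 0

-- _RULES = {SIG_: (1,3,0), SIG_0: (5,6,2), SIG_1: (7,8,4)}
def rulesB : PySem.Dict Int (Int × Int × Int) :=
  ((PySem.Dict.empty.insert 0 (1, 3, 0)).insert 1 (5, 6, 2)).insert 2 (7, 8, 4)

def ruleB (st : Int) (c : Char) : Int :=
  -- _RULES[st]: KeyError (none) is unreachable inside Pre_, getD default never read
  let base : Int × Int × Int := (rulesB.get? st).getD (0, 0, 0)
  if c = '0' then base.1 else if c = '1' then base.2.1 else base.2.2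

def genTransition_alt (prev_st : Int) (bit_str : String) (f : Option Int) : List Int × Int :=
  let chars := bit_str.toList
  let froms := prev_st :: chars.dropLast.map fromState
  (List.zipWith ruleB froms chars, 0)

-- ===== PRECONDITION & SPEC =====
-- Pre_ excludes exactly the inputs where A raises UnboundLocalError: a non-empty bit string with
-- prev_st outside the three machine states {SIG_, SIG_0, SIG_1}.
def Pre_genTransition (prev_st : Int) (bit_str : String) (f : Option Int) : Prop :=
  prev_st = 0 ∨ prev_st = 1 ∨ prev_st = 2 ∨ bit_str = ""
instance (prev_st : Int) (bit_str : String) (f : Option Int) : Decidable (Pre_genTransition prev_st bit_str f) := by unfold Pre_genTransition; infer_instance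
def pvWitness_genTransition : Int × String × Option Int := (0, "01*x0", none)

def Spec_genTransition (prev_st : Int) (bit_str : String) (f : Option Int) (out : List Int × Int) : Prop := out = genTransition_alt prev_st bit_str f
instance (prev_st : Int) (bit_str : String) (f : Option Int) (out : List Int × Int) : Decidable (Spec_genTransition prev_st bit_str f out) := by unfold Spec_genTransition; infer_instance

-- ===== CLAIM (what is proved, stated in full; the proofs are below) =====
def Claim_equal_genTransition : Prop := ∀ (prev_st : Int) (bit_str : String) (f : Option Int), Dom_genTransition prev_st bit_str f → Pre_genTransition prev_st bit_str f → Spec_genTransition prev_st bit_str f (genTransition prev_st bit_str f)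

-- ===== LEMMAS AND PROOFS =====
lemma transitionRulesA_eq (st : Int) (c : Char) (h : st = 0 ∨ st = 1 ∨ st = 2) :
    transitionRulesA st c = some (ruleB st c, fromState c) := by
  rcases h with h | h | h <;> subst h <;>
    simp only [transitionRulesA, ruleB, rulesB, fromState] <;>
    norm_num [PySem.Dict.get?, PySem.Dict.insert, PySem.Dict.empty] <;>
    split_ifs <;> simp_all

lemma fromState_mem (c : Char) : fromState c = 0 ∨ fromState c = 1 ∨ fromState c = 2 := by
  unfold fromState; split_ifs <;> simp

lemma genLoopA_eq (cs : List Char) (st : Int) (h : st = 0 ∨ st = 1 ∨ st = 2) :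
    genLoopA st cs = some (List.zipWith ruleB (st :: cs.dropLast.map fromState) cs) := by
  induction cs generalizing st with
  | nil => simp [genLoopA]
  | cons c rest ih =>
    rw [genLoopA, transitionRulesA_eq st c h]
    simp only [ih (fromState c) (fromState_mem c), Option.map_some]
    cases rest <;> simp [List.zipWith]

theorem genTransition_spec : Claim_equal_genTransition := by
  intro prev_st bit_str f _ hpre
  unfold Spec_genTransition genTransition genTransition_alt
  rcases hpre with h | h | h | h
  · rw [genLoopA_eq _ _ (Or.inl h)]; rfl
  · rw [genLoopA_eq _ _ (Or.inr (Or.inl h))]; rfl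
  · rw [genLoopA_eq _ _ (Or.inr (Or.inr h))]; rfl
  · subst h; rfl
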